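-- pv_equiv track=rewrite | github.com/NoisNette/Codesignal-solutions | magicalWell.py | magicalWell
-- ===== SOURCE A (Python) =====
-- def magicalWell(a, b, n):
--     ans = 0
--     while n:
--         ans += (a * b)
--         a += 1
--         b += 1
--         n -= 1
--     return ans
-- ===== SOURCE B (Python) =====
-- def magicalWell(a, b, n):
--     # closed form: sum_{k=0}^{n-1} (a+k)(b+k), evaluated in O(1)
--     return (6*n*a*b + 3*(a+b)*n*(n-1) + (n-1)*n*(2*n-1)) // 6
-- ===== Notes on version B (the rewrite author's own statement) =====
-- stated objective: faster
-- what changed: Replaces the O(n) accumulation loop by the closed-form polynomial sum (6nab + 3(a+b)n(n-1) + (n-1)n(2n-1))/6.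
import Mathlib
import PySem

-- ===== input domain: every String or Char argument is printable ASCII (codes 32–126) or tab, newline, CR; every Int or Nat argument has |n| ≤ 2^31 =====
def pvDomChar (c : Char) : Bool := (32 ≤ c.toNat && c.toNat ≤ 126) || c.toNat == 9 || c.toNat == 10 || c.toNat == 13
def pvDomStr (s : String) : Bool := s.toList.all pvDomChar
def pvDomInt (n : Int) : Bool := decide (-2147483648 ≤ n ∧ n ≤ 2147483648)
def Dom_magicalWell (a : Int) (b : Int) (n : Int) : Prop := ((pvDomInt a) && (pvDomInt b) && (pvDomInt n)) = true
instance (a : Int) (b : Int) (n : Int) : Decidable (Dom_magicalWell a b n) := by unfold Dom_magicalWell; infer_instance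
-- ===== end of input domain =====

-- B replaces A's O(n) accumulation loop by the closed-form polynomial sum, O(1).

-- ===== PORT A =====
-- A's while-loop: each iteration adds a*b to ans and increments a, b, decrementing n.
-- For n ≥ 0 it runs exactly n times; we recurse on n.toNat (Pre_ excludes n < 0, where A diverges).
def magicalWellLoop : Nat → Int → Int → Int → Int
  | 0, _, _, ans => ans
  | k + 1, a, b, ans => magicalWellLoop k (a + 1) (b + 1) (ans + a * b)

def magicalWell (a : Int) (b : Int) (n : Int) : Int :=
  magicalWellLoop n.toNat a b 0

-- ===== PORT B =====
def magicalWell_alt (a : Int) (b : Int) (n : Int) : Int :=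
  PySem.Int.floordiv (6 * n * a * b + 3 * (a + b) * n * (n - 1) + (n - 1) * n * (2 * n - 1)) 6

-- ===== PRECONDITION & SPEC =====
-- Pre_ excludes n < 0, on which A's 'while n' loop never terminates (n only decreases).
def Pre_magicalWell (a : Int) (b : Int) (n : Int) : Prop := 0 ≤ n
instance (a : Int) (b : Int) (n : Int) : Decidable (Pre_magicalWell a b n) := by unfold Pre_magicalWell; infer_instance
def pvWitness_magicalWell : Int × Int × Int := (2, 3, 4)

def Spec_magicalWell (a : Int) (b : Int) (n : Int) (out : Int) : Prop := out = magicalWell_alt a b n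
instance (a : Int) (b : Int) (n : Int) (out : Int) : Decidable (Spec_magicalWell a b n out) := by unfold Spec_magicalWell; infer_instance

-- ===== CLAIM =====
def Claim_equal_magicalWell : Prop := ∀ (a : Int) (b : Int) (n : Int), Dom_magicalWell a b n → Pre_magicalWell a b n → Spec_magicalWell a b n (magicalWell a b n)

-- ===== LEMMAS AND PROOFS =====
-- Loop invariant: six times the amount the loop adds is the closed polynomial in (k, a, b).
theorem magicalWellLoop_six (k : Nat) : ∀ (a b ans : Int),
    6 * magicalWellLoop k a b ans =
      6 * ans + 6 * (k : Int) * a * b + 3 * (a + b) * (k : Int) * ((k : Int) - 1)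
        + ((k : Int) - 1) * (k : Int) * (2 * (k : Int) - 1) := by
  induction k with
  | zero => intro a b ans; rw [magicalWellLoop]; push_cast; ring
  | succ m ih =>
    intro a b ans
    rw [magicalWellLoop, ih]
    push_cast
    ring

-- ===== VERDICT =====
theorem magicalWell_spec : Claim_equal_magicalWell := by
  intro a b n _ hn
  unfold Spec_magicalWell magicalWell magicalWell_alt
  have hcast : ((n.toNat : Int)) = n := Int.toNat_of_nonneg hn
  have h6 := magicalWellLoop_six n.toNat a b 0
  rw [hcast] at h6
  rw [PySem.Int.floordiv_eq_ediv_of_pos (by norm_num)]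
  have hpoly : 6 * n * a * b + 3 * (a + b) * n * (n - 1) + (n - 1) * n * (2 * n - 1)
      = 6 * magicalWellLoop n.toNat a b 0 := by omega
  rw [hpoly]
  omega
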